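-- pv_equiv track=rewrite | github.com/JakubMlocek/Algorithms_and_Data_Structures | kolokwiaIegzaminy/kol2/zad1.py | buildTabs
-- ===== SOURCE A (Python) =====
-- def buildTabs(T):
--     n = len(T)
--     students = []
--     for i in range(n):
--         h, a, b, w = T[i]
--         students.append(h * (b - a))
--
--     prev = [-1] * n
--     for pierwszy in range(n):
--         closestEnd = float('inf')
--         idxOfClosest = None
--         _,start,end,_ = T[pierwszy]
--         for drugi in range(n):
--             if drugi != pierwszy:
--                 _,x,y,_= T[drugi]
--                 if y < start and abs(y - start) < closestEnd:
--                     idxOfClosest = drugi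
--                     closestEnd = abs(y - start)
--         prev[pierwszy] = idxOfClosest
--
--     costs = []
--     for _,_,_,c in T:
--         costs.append(c)
--
--     return students, prev, costs
-- ===== SOURCE B (Python) =====
-- def buildTabs(T):
--     n = len(T)
--     students = [h * (b - a) for h, a, b, _ in T]
--     costs = [t[3] for t in T]
--     # sort (end, index) so that ends ascend and, among equal ends, indices DESCEND:
--     # the single integer key end*(n+1)-index encodes that order (0 <= index < n).
--     pairs = sorted(((t[2], j) for j, t in enumerate(T)), key=lambda p: p[0] * (n + 1) - p[1])
--     prev = []
--     for i, t in enumerate(T):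
--         a = t[1]
--         lo, hi = 0, n          # binary search: lo ends as the count of ends < a
--         while lo < hi:
--             mid = (lo + hi) // 2
--             if pairs[mid][0] < a:
--                 lo = mid + 1
--             else:
--                 hi = mid
--         if lo == 0:
--             prev.append(None)
--         else:
--             j = pairs[lo - 1][1]
--             if j != i:
--                 prev.append(j)
--             elif lo == 1:
--                 prev.append(None)
--             else:
--                 prev.append(pairs[lo - 2][1])
--     return students, prev, costs
-- ===== Notes on version B (the rewrite author's own statement) =====
-- stated objective: faster
-- what changed: The O(n^2) inner scan for each student's nearest prior end is replaced by sorting (end,index) pairs once with an integer key encoding (end asc, index desc) and answering each query with a binary search, stepping back one slot when the hit is the student itself.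
import Mathlib
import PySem

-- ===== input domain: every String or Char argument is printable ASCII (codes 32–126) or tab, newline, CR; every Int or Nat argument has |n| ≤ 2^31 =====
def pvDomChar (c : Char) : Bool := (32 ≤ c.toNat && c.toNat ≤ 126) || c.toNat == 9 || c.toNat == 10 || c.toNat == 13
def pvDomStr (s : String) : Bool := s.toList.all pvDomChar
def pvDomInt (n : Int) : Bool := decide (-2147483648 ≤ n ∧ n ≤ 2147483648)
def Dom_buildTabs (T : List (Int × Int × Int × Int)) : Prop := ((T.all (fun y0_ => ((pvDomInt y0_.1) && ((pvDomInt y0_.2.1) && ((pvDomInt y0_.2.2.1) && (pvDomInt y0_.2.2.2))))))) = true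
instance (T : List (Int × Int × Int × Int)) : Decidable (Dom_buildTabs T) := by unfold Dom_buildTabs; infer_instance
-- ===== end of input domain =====

-- B replaces A's O(n^2) all-pairs scan by one sort of (end, index) pairs plus a binary
-- search per student (objective: faster; a timing run measures the speed-up).

-- ===== PORT A =====
-- literal port of A; 'prev[pierwszy] = …' assigns indices 0,1,…,n-1 in order, rendered as
-- appending the assigned value; float('inf') / None initial state is the Option state (none, none).
def buildTabs (T : List (Int × Int × Int × Int)) : List Int × List (Option Int) × List Int :=
  let n : Int := (T.length : Int)
  let students := (PySem.List.pyRange 0 n 1).foldl (fun acc i =>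
      let t := PySem.List.pyGetD T i (0, 0, 0, 0)
      acc ++ [t.1 * (t.2.2.1 - t.2.1)]) []
  let prev := (PySem.List.pyRange 0 n 1).foldl (fun pr pierwszy =>
      let t := PySem.List.pyGetD T pierwszy (0, 0, 0, 0)
      let start := t.2.1
      let st := (PySem.List.pyRange 0 n 1).foldl
        (fun (s : Option Int × Option Int) drugi =>
          if drugi ≠ pierwszy then
            let u := PySem.List.pyGetD T drugi (0, 0, 0, 0)
            let y := u.2.2.1
            if y < start then
              match s.1 with
              | none => (some |y - start|, some drugi)
              | some c => if |y - start| < c then (some |y - start|, some drugi) else s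
            else s
          else s) ((none, none) : Option Int × Option Int)
      pr ++ [st.2]) ([] : List (Option Int))
  let costs := T.foldl (fun acc t => acc ++ [t.2.2.2]) []
  (students, prev, costs)

-- ===== PORT B =====
-- the hand-written 'while lo < hi' binary search of Source B
def bsearchLoop (pairs : List (Int × Int)) (a lo hi : Int) : Int :=
  if h : lo < hi then
    let mid := PySem.Int.floordiv (lo + hi) 2
    if (PySem.List.pyGetD pairs mid (0, 0)).1 < a then
      bsearchLoop pairs a (mid + 1) hi
    else
      bsearchLoop pairs a lo mid
  else lo
termination_by (hi - lo).toNat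
decreasing_by
  · have _hb := PySem.Int.floordiv_two_mid_bounds (le_of_lt h)
    have hlt : PySem.Int.floordiv (lo + hi) 2 < hi := by
      rw [PySem.Int.floordiv_lt_iff_lt_mul (by omega : (0:Int) < 2)]; omega
    omega
  · have hb := PySem.Int.floordiv_two_mid_bounds (le_of_lt h)
    have hlt : PySem.Int.floordiv (lo + hi) 2 < hi := by
      rw [PySem.Int.floordiv_lt_iff_lt_mul (by omega : (0:Int) < 2)]; omega
    omega

def buildTabs_alt (T : List (Int × Int × Int × Int)) : List Int × List (Option Int) × List Int :=
  let n : Int := (T.length : Int)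
  let students := T.map (fun t => t.1 * (t.2.2.1 - t.2.1))
  let costs := T.map (fun t => t.2.2.2)
  let pairs := PySem.List.sorted ((PySem.List.enumerate T 0).map (fun jt => (jt.2.2.2.1, jt.1)))
      (fun p => p.1 * (n + 1) - p.2) false
  let prev := (PySem.List.enumerate T 0).foldl (fun pr it =>
      let i := it.1
      let a := it.2.2.1
      let lo := bsearchLoop pairs a 0 n
      pr ++ [if lo = 0 then none
             else
               let j := (PySem.List.pyGetD pairs (lo - 1) (0, 0)).2
               if j ≠ i then some j
               else if lo = 1 then none
               else some (PySem.List.pyGetD pairs (lo - 2) (0, 0)).2]) []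
  (students, prev, costs)

-- ===== PRECONDITION & SPEC =====
def Spec_buildTabs (T : List (Int × Int × Int × Int)) (out : List Int × List (Option Int) × List Int) : Prop := out = buildTabs_alt T
instance (T : List (Int × Int × Int × Int)) (out : List Int × List (Option Int) × List Int) : Decidable (Spec_buildTabs T out) := by unfold Spec_buildTabs; infer_instance

-- ===== CLAIM (what is proved, stated in full; the proofs are below) =====
def Claim_equal_buildTabs : Prop := ∀ (T : List (Int × Int × Int × Int)), Dom_buildTabs T → Spec_buildTabs T (buildTabs T)

-- ===== LEMMAS AND PROOFS =====

-- the sort key of B: (end, index) ordered as (end ascending, index descending)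
def pvKey (n : Int) (p : Int × Int) : Int := p.1 * (n + 1) - p.2

-- abstract one-candidate step: keep the candidate with the largest end < a (first wins ties), skipping index i
def pvStep (a i : Int) (s : Option (Int × Int)) (p : Int × Int) : Option (Int × Int) :=
  if p.2 ≠ i ∧ p.1 < a then
    match s with
    | none => some p
    | some q => if q.1 < p.1 then some p else s
  else s

-- A's inner-loop state (closestEnd, idxOfClosest) as a function of the abstract state
def pvEnc (a : Int) (s : Option (Int × Int)) : Option Int × Option Int :=
  match s with
  | none => (none, none)
  | some p => (some (a - p.1), some p.2)

theorem pvEnc_snd (a : Int) (s : Option (Int × Int)) : (pvEnc a s).2 = s.map (fun p => p.2) := by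
  cases s <;> rfl

theorem pvStep_inv (a i : Int) (s : Option (Int × Int)) (c : Int × Int)
    (hs : ∀ p, s = some p → p.1 < a) :
    ∀ p, pvStep a i s c = some p → p.1 < a := by
  intro p hp
  unfold pvStep at hp
  split_ifs at hp with h
  · cases s with
    | none => cases hp; exact h.2
    | some q =>
      dsimp only at hp
      split_ifs at hp with h2
      · cases hp; exact h.2
      · exact hs p hp
  · exact hs p hp

theorem pvStep_keep (a i : Int) (x : Int × Int) :
    ∀ (cs : List (Int × Int)), (∀ p ∈ cs, p.2 ≠ i → p.1 < a → p.1 ≤ x.1) →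
    cs.foldl (pvStep a i) (some x) = some x := by
  intro cs
  induction cs with
  | nil => intro _; rfl
  | cons c t ih =>
    intro h
    have hstep : pvStep a i (some x) c = some x := by
      by_cases hv : c.2 ≠ i ∧ c.1 < a
      · have hle := h c (by simp) hv.1 hv.2
        unfold pvStep
        rw [if_pos hv]
        dsimp only
        rw [if_neg (by omega)]
      · unfold pvStep; rw [if_neg hv]
    rw [List.foldl_cons, hstep]
    exact ih (fun p hp => h p (by simp [hp]))

theorem pvStep_none (a i : Int) :
    ∀ (cs : List (Int × Int)), (∀ p ∈ cs, p.2 ≠ i → ¬ p.1 < a) →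
    cs.foldl (pvStep a i) none = none := by
  intro cs
  induction cs with
  | nil => intro _; rfl
  | cons c t ih =>
    intro h
    have hstep : pvStep a i none c = none := by
      unfold pvStep
      rw [if_neg]
      rintro ⟨h1, h2⟩
      exact h c (by simp) h1 h2
    rw [List.foldl_cons, hstep]
    exact ih (fun p hp => h p (by simp [hp]))

theorem pvStep_max (a i : Int) (x : Int × Int) (hx : x.2 ≠ i ∧ x.1 < a) :
    ∀ (cs : List (Int × Int)) (s : Option (Int × Int)),
    x ∈ cs →
    (∀ p ∈ cs, p.2 ≠ i → p.1 < a → p ≠ x → p.1 < x.1 ∨ (p.1 = x.1 ∧ x.2 < p.2)) →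
    cs.Pairwise (fun p q => p.2 < q.2) →
    (s = none ∨ ∃ h, s = some h ∧ h.1 < x.1) →
    cs.foldl (pvStep a i) s = some x := by
  intro cs
  induction cs with
  | nil => intro s hmem; exact absurd hmem (by simp)
  | cons c t ih =>
    intro s hmem hdom hpw hs
    rw [List.foldl_cons]
    by_cases hcx : c = x
    · subst hcx
      have hstep : pvStep a i s c = some c := by
        rcases hs with h0 | ⟨h, hh, hlt⟩
        · subst h0; unfold pvStep; rw [if_pos hx]
        · subst hh; unfold pvStep; rw [if_pos hx]; dsimp only; rw [if_pos hlt]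
      rw [hstep]
      apply pvStep_keep
      intro p hp hpi hpa
      by_cases hpx : p = c
      · subst hpx; exact le_refl _
      · rcases hdom p (by simp [hp]) hpi hpa hpx with h | h
        · exact le_of_lt h
        · exact le_of_eq h.1
    · have hxt : x ∈ t := by
        rcases List.mem_cons.mp hmem with h | h
        · exact absurd h.symm hcx
        · exact h
      have hcsnd : ∀ p ∈ t, c.2 < p.2 := (List.pairwise_cons.mp hpw).1
      have hnews : (pvStep a i s c = none ∨ ∃ h, pvStep a i s c = some h ∧ h.1 < x.1) := by
        by_cases hv : c.2 ≠ i ∧ c.1 < a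
        · have hcx1 : c.1 < x.1 := by
            rcases hdom c (by simp) hv.1 hv.2 hcx with h | h
            · exact h
            · exact absurd (hcsnd x hxt) (by omega)
          rcases hs with h0 | ⟨h, hh, hlt⟩
          · subst h0
            exact Or.inr ⟨c, by unfold pvStep; rw [if_pos hv], hcx1⟩
          · subst hh
            by_cases hrep : h.1 < c.1
            · exact Or.inr ⟨c, by unfold pvStep; rw [if_pos hv]; dsimp only; rw [if_pos hrep], hcx1⟩
            · exact Or.inr ⟨h, by unfold pvStep; rw [if_pos hv]; dsimp only; rw [if_neg hrep], hlt⟩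
        · have : pvStep a i s c = s := by unfold pvStep; rw [if_neg hv]
          rw [this]; exact hs
      exact ih _ hxt (fun p hp => hdom p (by simp [hp])) (List.pairwise_cons.mp hpw).2 hnews

-- coupling of A's literal inner-loop body with the abstract step
theorem pvCouple (a i : Int) :
    ∀ (cs : List (Int × Int)) (s : Option (Int × Int)), (∀ p, s = some p → p.1 < a) →
    cs.foldl (fun (st : Option Int × Option Int) p =>
        if p.2 ≠ i then
          if p.1 < a then
            match st.1 with
            | none => (some |p.1 - a|, some p.2)
            | some c => if |p.1 - a| < c then (some |p.1 - a|, some p.2) else st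
          else st
        else st) (pvEnc a s)
    = pvEnc a (cs.foldl (pvStep a i) s) := by
  intro cs
  induction cs with
  | nil => intro s _; rfl
  | cons c t ih =>
    intro s hs
    rw [List.foldl_cons, List.foldl_cons]
    have habs : c.1 < a → |c.1 - a| = a - c.1 := by
      intro h; rw [abs_of_neg (by omega)]; ring
    have hstep :
        (if c.2 ≠ i then
          if c.1 < a then
            match (pvEnc a s).1 with
            | none => (some |c.1 - a|, some c.2)
            | some cc => if |c.1 - a| < cc then (some |c.1 - a|, some c.2) else pvEnc a s
          else pvEnc a s
        else pvEnc a s) = pvEnc a (pvStep a i s c) := by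
      by_cases h1 : c.2 ≠ i
      · by_cases h2 : c.1 < a
        · cases s with
          | none =>
            unfold pvStep pvEnc
            rw [if_pos h1, if_pos h2, if_pos ⟨h1, h2⟩]
            simp [habs h2]
          | some q =>
            have hq := hs q rfl
            by_cases h3 : q.1 < c.1
            · unfold pvStep pvEnc
              rw [if_pos h1, if_pos h2, if_pos ⟨h1, h2⟩]
              dsimp only
              rw [if_pos h3, if_pos (by rw [habs h2]; omega)]
              simp [habs h2]
            · unfold pvStep pvEnc
              rw [if_pos h1, if_pos h2, if_pos ⟨h1, h2⟩]
              dsimp only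
              rw [if_neg h3, if_neg (by rw [habs h2]; omega)]
        · unfold pvStep
          rw [if_pos h1, if_neg h2, if_neg (by tauto)]
      · unfold pvStep
        rw [if_neg h1, if_neg (by tauto)]
    rw [hstep]
    exact ih _ (pvStep_inv a i s c hs)

theorem pvKey_mono (n : Int) (p q : Int × Int) (hp2 : 0 ≤ p.2) (hp2n : p.2 < n)
    (_hq2 : 0 ≤ q.2) (hq2n : q.2 < n) (h : p.1 < q.1) : pvKey n p < pvKey n q := by
  unfold pvKey
  have h1 : p.1 + 1 ≤ q.1 := by omega
  have h2 : (p.1 + 1) * (n + 1) ≤ q.1 * (n + 1) :=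
    mul_le_mul_of_nonneg_right h1 (by omega)
  have h3 : (p.1 + 1) * (n + 1) = p.1 * (n + 1) + n + 1 := by ring
  linarith

theorem pvKey_lt_iff (n : Int) (p q : Int × Int) (hp2 : 0 ≤ p.2) (hp2n : p.2 < n)
    (hq2 : 0 ≤ q.2) (hq2n : q.2 < n) :
    pvKey n p < pvKey n q ↔ (p.1 < q.1 ∨ (p.1 = q.1 ∧ q.2 < p.2)) := by
  constructor
  · intro h
    rcases lt_trichotomy p.1 q.1 with h1 | h1 | h1
    · exact Or.inl h1
    · refine Or.inr ⟨h1, ?_⟩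
      unfold pvKey at h
      rw [h1] at h
      linarith
    · exact absurd (pvKey_mono n q p hq2 hq2n hp2 hp2n h1) (by omega)
  · rintro (h | ⟨h1, h2⟩)
    · exact pvKey_mono n p q hp2 hp2n hq2 hq2n h
    · unfold pvKey; rw [h1]; linarith

theorem pvKey_inj (n : Int) (p q : Int × Int) (hp2 : 0 ≤ p.2) (hp2n : p.2 < n)
    (hq2 : 0 ≤ q.2) (hq2n : q.2 < n) (h : pvKey n p = pvKey n q) : p = q := by
  rcases lt_trichotomy p.1 q.1 with h1 | h1 | h1
  · exact absurd (pvKey_mono n p q hp2 hp2n hq2 hq2n h1) (by omega)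
  · have h2 : p.2 = q.2 := by
      unfold pvKey at h
      rw [h1] at h
      linarith
    exact Prod.ext h1 h2
  · exact absurd (pvKey_mono n q p hq2 hq2n hp2 hp2n h1) (by omega)

theorem pvBsearch (P : List (Int × Int)) (a : Int)
    (hmono : P.Pairwise (fun p q => p.1 ≤ q.1)) :
    ∀ (k : Nat) (lo hi : Int), (hi - lo).toNat ≤ k → 0 ≤ lo → lo ≤ hi → hi ≤ (P.length : Int) →
    (∀ (m : Nat) (h : m < P.length), (m : Int) < lo → (P[m]'h).1 < a) →
    (∀ (m : Nat) (h : m < P.length), hi ≤ (m : Int) → ¬ (P[m]'h).1 < a) →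
    0 ≤ bsearchLoop P a lo hi ∧ bsearchLoop P a lo hi ≤ (P.length : Int) ∧
    (∀ (m : Nat) (h : m < P.length), (m : Int) < bsearchLoop P a lo hi → (P[m]'h).1 < a) ∧
    (∀ (m : Nat) (h : m < P.length), bsearchLoop P a lo hi ≤ (m : Int) → ¬ (P[m]'h).1 < a) := by
  have hpg := List.pairwise_iff_getElem.mp hmono
  intro k
  induction k with
  | zero =>
    intro lo hi hk h0 hlh hhl hlow hhigh
    have hnl : ¬ lo < hi := by omega
    rw [bsearchLoop, dif_neg hnl]
    exact ⟨h0, by omega, fun m h hm => hlow m h hm, fun m h hm => hhigh m h (by omega)⟩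
  | succ k ih =>
    intro lo hi hk h0 hlh hhl hlow hhigh
    by_cases hlt : lo < hi
    · rw [bsearchLoop, dif_pos hlt]
      have hb := PySem.Int.floordiv_two_mid_bounds (le_of_lt hlt)
      have hmidhi : PySem.Int.floordiv (lo + hi) 2 < hi := by
        rw [PySem.Int.floordiv_lt_iff_lt_mul (by omega : (0:Int) < 2)]; omega
      set mid := PySem.Int.floordiv (lo + hi) 2 with hmiddef
      have hmnat : mid.toNat < P.length := by omega
      have hget : PySem.List.pyGetD P mid (0, 0) = P[mid.toNat]'hmnat :=
        PySem.List.pyGetD_eq_getElem P (0, 0) (by omega) (by omega)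
      dsimp only
      rw [hget]
      by_cases hcmp : (P[mid.toNat]'hmnat).1 < a
      · rw [if_pos hcmp]
        refine ih (mid + 1) hi (by omega) (by omega) (by omega) hhl ?_ hhigh
        intro m h hm
        by_cases hmeq : m = mid.toNat
        · subst hmeq; exact hcmp
        · exact lt_of_le_of_lt (hpg m mid.toNat h hmnat (by omega)) hcmp
      · rw [if_neg hcmp]
        refine ih lo mid (by omega) h0 (by omega) (by omega) hlow ?_
        intro m h hm
        by_cases hmeq : m = mid.toNat
        · subst hmeq; exact hcmp
        · intro hlt2
          exact hcmp (lt_of_le_of_lt (hpg mid.toNat m hmnat h (by omega)) hlt2)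
    · rw [bsearchLoop, dif_neg hlt]
      exact ⟨h0, by omega, fun m h hm => hlow m h (by omega), fun m h hm => hhigh m h (by omega)⟩

-- the list of (end, original index) pairs, and its sort by B's key
def pvP0 (T : List (Int × Int × Int × Int)) : List (Int × Int) :=
  (PySem.List.enumerate T 0).map (fun jt => (jt.2.2.2.1, jt.1))

def pvPairs (T : List (Int × Int × Int × Int)) : List (Int × Int) :=
  PySem.List.sorted (pvP0 T) (fun p => p.1 * ((T.length : Int) + 1) - p.2) false

theorem pvP0_snd_bounds (T : List (Int × Int × Int × Int)) :
    ∀ p ∈ pvP0 T, 0 ≤ p.2 ∧ p.2 < (T.length : Int) := by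
  intro p hp
  unfold pvP0 at hp
  obtain ⟨jt, hjt, rfl⟩ := List.mem_map.mp hp
  obtain ⟨k, hk, rfl⟩ := (PySem.List.mem_enumerate_iff T 0 jt).mp hjt
  simp only
  omega

theorem pvP0_snd_pairwise (T : List (Int × Int × Int × Int)) :
    (pvP0 T).Pairwise (fun p q => p.2 < q.2) := by
  unfold pvP0
  rw [List.pairwise_map]
  exact PySem.List.pairwise_lt_enumerate T 0

theorem pvP0_snd_nodup (T : List (Int × Int × Int × Int)) :
    ((pvP0 T).map (fun p => p.2)).Nodup := by
  unfold pvP0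
  rw [List.map_map]
  have h : ((fun p : Int × Int => p.2) ∘ fun jt : Int × (Int × Int × Int × Int) => (jt.2.2.2.1, jt.1))
      = fun jt : Int × (Int × Int × Int × Int) => jt.1 := rfl
  rw [h, PySem.List.map_fst_enumerate]
  exact PySem.List.nodup_pyRange_one 0 (0 + (T.length : Int))

theorem pvPairs_perm (T : List (Int × Int × Int × Int)) : (pvPairs T).Perm (pvP0 T) :=
  PySem.List.sorted_perm (pvP0 T) _ false

theorem pvPairs_length (T : List (Int × Int × Int × Int)) : (pvPairs T).length = T.length := by
  rw [(pvPairs_perm T).length_eq]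
  unfold pvP0
  rw [List.length_map, PySem.List.length_enumerate]

theorem pvPairs_snd_bounds (T : List (Int × Int × Int × Int)) :
    ∀ p ∈ pvPairs T, 0 ≤ p.2 ∧ p.2 < (T.length : Int) := by
  intro p hp
  exact pvP0_snd_bounds T p ((pvPairs_perm T).mem_iff.mp hp)

theorem pvPairs_snd_ne (T : List (Int × Int × Int × Int)) :
    (pvPairs T).Pairwise (fun p q => p.2 ≠ q.2) := by
  have h1 : ((pvPairs T).map (fun p => p.2)).Nodup :=
    (((pvPairs_perm T).map (fun p => p.2)).nodup_iff).mpr (pvP0_snd_nodup T)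
  rw [List.Nodup, List.pairwise_map] at h1
  exact h1

theorem pvPairs_key_pairwise (T : List (Int × Int × Int × Int)) :
    (pvPairs T).Pairwise (fun p q => pvKey (T.length : Int) p < pvKey (T.length : Int) q) := by
  have hle : (pvPairs T).Pairwise
      (fun p q => pvKey (T.length : Int) p ≤ pvKey (T.length : Int) q) :=
    PySem.List.sorted_pairwise (pvP0 T) (fun p => p.1 * ((T.length : Int) + 1) - p.2) 
  have hne := pvPairs_snd_ne T
  have hand := hle.and hne
  refine hand.imp_of_mem ?_
  intro p q hp hq ⟨h1, h2⟩
  have hbp := pvPairs_snd_bounds T p hp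
  have hbq := pvPairs_snd_bounds T q hq
  rcases lt_or_eq_of_le h1 with h | h
  · exact h
  · exact absurd (pvKey_inj (T.length : Int) p q hbp.1 hbp.2 hbq.1 hbq.2 h) (by intro e; exact h2 (by rw [e]))

theorem pvPairs_fst_pairwise (T : List (Int × Int × Int × Int)) :
    (pvPairs T).Pairwise (fun p q => p.1 ≤ q.1) := by
  refine (pvPairs_key_pairwise T).imp_of_mem ?_
  intro p q hp hq h
  have hbp := pvPairs_snd_bounds T p hp
  have hbq := pvPairs_snd_bounds T q hq
  rcases (pvKey_lt_iff (T.length : Int) p q hbp.1 hbp.2 hbq.1 hbq.2).mp h with h | h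
  · exact le_of_lt h
  · exact le_of_eq h.1

-- B's per-student lookup computes the abstract best candidate
theorem pvEntry (T : List (Int × Int × Int × Int)) (i a : Int) :
    (if bsearchLoop (pvPairs T) a 0 (T.length : Int) = 0 then (none : Option Int)
     else
       if (PySem.List.pyGetD (pvPairs T) (bsearchLoop (pvPairs T) a 0 (T.length : Int) - 1) (0, 0)).2 ≠ i then
         some (PySem.List.pyGetD (pvPairs T) (bsearchLoop (pvPairs T) a 0 (T.length : Int) - 1) (0, 0)).2
       else if bsearchLoop (pvPairs T) a 0 (T.length : Int) = 1 then none
       else some (PySem.List.pyGetD (pvPairs T) (bsearchLoop (pvPairs T) a 0 (T.length : Int) - 2) (0, 0)).2)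
    = ((pvP0 T).foldl (pvStep a i) none).map (fun p => p.2) := by
  have hlen := pvPairs_length T
  have hC := pvBsearch (pvPairs T) a (pvPairs_fst_pairwise T) T.length 0 (T.length : Int)
    (by omega) (by omega) (by omega) (by omega)
    (fun m h hm => absurd hm (by omega))
    (fun m h hm => absurd hm (by omega))
  set r := bsearchLoop (pvPairs T) a 0 (T.length : Int) with hrdef
  obtain ⟨hr0, hrlen, hlow, hhigh⟩ := hC
  have hmemidx : ∀ q ∈ pvP0 T, ∃ (m : Nat) (h : m < (pvPairs T).length), (pvPairs T)[m]'h = q :=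
    fun q hq => List.mem_iff_getElem.mp ((pvPairs_perm T).mem_iff.mpr hq)
  have hkey := List.pairwise_iff_getElem.mp (pvPairs_key_pairwise T)
  have hsnd := List.pairwise_iff_getElem.mp (pvPairs_snd_ne T)
  by_cases hr : r = 0
  · rw [if_pos hr]
    rw [pvStep_none a i (pvP0 T) ?_]
    · rfl
    · intro p hp _ hpa
      obtain ⟨m, h, heq⟩ := hmemidx p hp
      exact hhigh m h (by omega) (heq ▸ hpa)
  · rw [if_neg hr]
    have h1nat : (r - 1).toNat < (pvPairs T).length := by omega
    have hgp : PySem.List.pyGetD (pvPairs T) (r - 1) (0, 0) = (pvPairs T)[(r - 1).toNat]'h1nat :=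
      PySem.List.pyGetD_eq_getElem (pvPairs T) (0, 0) (by omega) (by omega)
    set p := (pvPairs T)[(r - 1).toNat]'h1nat with hpdef
    have hpa : p.1 < a := hlow (r - 1).toNat h1nat (by omega)
    have hpmem : p ∈ pvPairs T := List.getElem_mem h1nat
    have hpmem0 : p ∈ pvP0 T := (pvPairs_perm T).mem_iff.mp hpmem
    have hbp := pvPairs_snd_bounds T p hpmem
    rw [hgp]
    by_cases hpi : p.2 ≠ i
    · rw [if_pos hpi]
      rw [pvStep_max a i p ⟨hpi, hpa⟩ (pvP0 T) none hpmem0 ?_ (pvP0_snd_pairwise T) (Or.inl rfl)]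
      · rfl
      · intro q hq hqi hqa hqp
        obtain ⟨m, h, heq⟩ := hmemidx q hq
        have hmr : (m : Int) < r := by
          by_contra hc
          exact hhigh m h (by omega) (heq ▸ hqa)
        have hmne : m ≠ (r - 1).toNat := by
          intro e
          subst e
          exact hqp (heq.symm.trans hpdef.symm)
        have hk := hkey m (r - 1).toNat h h1nat (by omega)
        rw [heq] at hk
        have hbq := pvPairs_snd_bounds T q (heq ▸ List.getElem_mem h)
        exact (pvKey_lt_iff (T.length : Int) q p hbq.1 hbq.2 hbp.1 hbp.2).mp hk
    · rw [if_neg hpi]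
      have hpi' : p.2 = i := by omega
      by_cases hr1 : r = 1
      · rw [if_pos hr1]
        rw [pvStep_none a i (pvP0 T) ?_]
        · rfl
        · intro q hq hqi hqa
          obtain ⟨m, h, heq⟩ := hmemidx q hq
          have hmr : (m : Int) < r := by
            by_contra hc
            exact hhigh m h (by omega) (heq ▸ hqa)
          have e : m = (r - 1).toNat := by omega
          subst e
          exact hqi (by rw [← heq]; exact hpi')
      · rw [if_neg hr1]
        have hr2 : 2 ≤ r := by omega
        have h2nat : (r - 2).toNat < (pvPairs T).length := by omega
        have hgq : PySem.List.pyGetD (pvPairs T) (r - 2) (0, 0) = (pvPairs T)[(r - 2).toNat]'h2nat :=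
          PySem.List.pyGetD_eq_getElem (pvPairs T) (0, 0) (by omega) (by omega)
        set q := (pvPairs T)[(r - 2).toNat]'h2nat with hqdef
        have hqa : q.1 < a := hlow (r - 2).toNat h2nat (by omega)
        have hqmem : q ∈ pvPairs T := List.getElem_mem h2nat
        have hqmem0 : q ∈ pvP0 T := (pvPairs_perm T).mem_iff.mp hqmem
        have hbq := pvPairs_snd_bounds T q hqmem
        have hqi : q.2 ≠ i := by
          have := hsnd (r - 2).toNat (r - 1).toNat h2nat h1nat (by omega)
          rw [← hqdef, ← hpdef] at this
          omega
        rw [hgq]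
        rw [pvStep_max a i q ⟨hqi, hqa⟩ (pvP0 T) none hqmem0 ?_ (pvP0_snd_pairwise T) (Or.inl rfl)]
        · rfl
        · intro x hx hxi hxa hxq
          obtain ⟨m, h, heq⟩ := hmemidx x hx
          have hmr : (m : Int) < r := by
            by_contra hc
            exact hhigh m h (by omega) (heq ▸ hxa)
          have hm1 : m ≠ (r - 1).toNat := by
            intro e
            subst e
            exact hxi (by rw [← heq]; exact hpi')
          have hm2 : m ≠ (r - 2).toNat := by
            intro e
            subst e
            exact hxq (hqdef.trans heq).symm
          have hk := hkey m (r - 2).toNat h h2nat (by omega)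
          rw [heq, ← hqdef] at hk
          have hbx := pvPairs_snd_bounds T x (heq ▸ List.getElem_mem h)
          exact (pvKey_lt_iff (T.length : Int) x q hbx.1 hbx.2 hbq.1 hbq.2).mp hk

theorem pvMapGet {α : Type} (xs : List (Int × Int × Int × Int)) (d : Int × Int × Int × Int)
    (g : (Int × Int × Int × Int) → α) :
    (PySem.List.pyRange 0 (xs.length : Int) 1).map (fun j => g (PySem.List.pyGetD xs j d))
      = xs.map g := by
  conv_rhs => rw [← PySem.List.map_pyGetD_pyRange_zero' xs d]
  rw [List.map_map]
  rfl

theorem pvP0_eq (T : List (Int × Int × Int × Int)) :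
    pvP0 T = (PySem.List.pyRange 0 (T.length : Int) 1).map
      (fun dr => ((PySem.List.pyGetD T dr (0, 0, 0, 0)).2.2.1, dr)) := by
  unfold pvP0
  rw [PySem.List.enumerate_eq_map_pyRange T (0, 0, 0, 0), List.map_map]
  rfl

theorem buildTabs_spec : Claim_equal_buildTabs := by
  unfold Claim_equal_buildTabs
  intro T _
  unfold Spec_buildTabs buildTabs buildTabs_alt
  dsimp only
  simp only [Prod.mk.injEq]
  refine ⟨?_, ?_, ?_⟩
  · -- students
    rw [PySem.List.foldl_append_singleton_eq_map, List.nil_append]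
    exact pvMapGet T (0, 0, 0, 0) (fun t => t.1 * (t.2.2.1 - t.2.1))
  · -- prev
    rw [PySem.List.foldl_append_singleton_eq_map, PySem.List.foldl_append_singleton_eq_map,
      List.nil_append, List.nil_append,
      PySem.List.enumerate_eq_map_pyRange T (0, 0, 0, 0), List.map_map]
    refine List.map_congr_left ?_
    intro j _
    dsimp only [Function.comp]
    have hA : List.foldl
        (fun (s : Option Int × Option Int) drugi =>
          if drugi ≠ j then
            if (PySem.List.pyGetD T drugi (0, 0, 0, 0)).2.2.1 < (PySem.List.pyGetD T j (0, 0, 0, 0)).2.1 then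
              match s.1 with
              | none => (some |(PySem.List.pyGetD T drugi (0, 0, 0, 0)).2.2.1 - (PySem.List.pyGetD T j (0, 0, 0, 0)).2.1|, some drugi)
              | some c => if |(PySem.List.pyGetD T drugi (0, 0, 0, 0)).2.2.1 - (PySem.List.pyGetD T j (0, 0, 0, 0)).2.1| < c then
                  (some |(PySem.List.pyGetD T drugi (0, 0, 0, 0)).2.2.1 - (PySem.List.pyGetD T j (0, 0, 0, 0)).2.1|, some drugi)
                else s
            else s
          else s)
        ((none, none) : Option Int × Option Int) (PySem.List.pyRange 0 (T.length : Int) 1)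
        = pvEnc ((PySem.List.pyGetD T j (0, 0, 0, 0)).2.1)
            ((pvP0 T).foldl (pvStep ((PySem.List.pyGetD T j (0, 0, 0, 0)).2.1) j) none) := by
      rw [← pvCouple ((PySem.List.pyGetD T j (0, 0, 0, 0)).2.1) j (pvP0 T) none (by intro p hp; cases hp)]
      rw [pvP0_eq T, List.foldl_map]
      rfl
    rw [hA, pvEnc_snd, ← PySem.List.enumerate_eq_map_pyRange T (0, 0, 0, 0)]
    exact (pvEntry T j ((PySem.List.pyGetD T j (0, 0, 0, 0)).2.1)).symm
  · -- costs
    rw [PySem.List.foldl_append_singleton_eq_map, List.nil_append]
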